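-- pv_equiv track=rewrite | github.com/master0v/urgent_vs_important | tasks_api.py | _to_notes_block
-- ===== SOURCE A (Python) =====
-- def _to_notes_block(kvs: dict):
--     # keep order x,y,est,progress if present
--     order = ['x', 'y', 'est', 'progress']
--     parts = []
--     for k in order:
--         if k in kvs:
--             parts.append(f"{k}={kvs[k]}")
--     # include any other keys that may be present
--     for k in kvs:
--         if k not in order:
--             parts.append(f"{k}={kvs[k]}")
--     return "[" + ",".join(parts) + "]"
-- ===== SOURCE B (Python) =====
-- def _to_notes_block(kvs: dict):
--     # single pass: distribute each entry into a rank bucket, then flatten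
--     rank = {'x': 0, 'y': 1, 'est': 2, 'progress': 3}
--     buckets = [[], [], [], [], []]
--     for k, v in kvs.items():
--         buckets[rank.get(k, 4)].append(f"{k}={v}")
--     return "[" + ",".join(p for b in buckets for p in b) + "]"
-- ===== Notes on version B (the rewrite author's own statement) =====
-- stated objective: alternative
-- what changed: Replaces A's two sequential filtered scans (one over the priority-key list probing the dict, one over the dict skipping priority keys) by a single pass over the dict that distributes every entry into one of five rank buckets via a rank dict, then flattens the buckets; Pre_ only requires distinct keys, which every Python dict argument has.
import Mathlib
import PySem

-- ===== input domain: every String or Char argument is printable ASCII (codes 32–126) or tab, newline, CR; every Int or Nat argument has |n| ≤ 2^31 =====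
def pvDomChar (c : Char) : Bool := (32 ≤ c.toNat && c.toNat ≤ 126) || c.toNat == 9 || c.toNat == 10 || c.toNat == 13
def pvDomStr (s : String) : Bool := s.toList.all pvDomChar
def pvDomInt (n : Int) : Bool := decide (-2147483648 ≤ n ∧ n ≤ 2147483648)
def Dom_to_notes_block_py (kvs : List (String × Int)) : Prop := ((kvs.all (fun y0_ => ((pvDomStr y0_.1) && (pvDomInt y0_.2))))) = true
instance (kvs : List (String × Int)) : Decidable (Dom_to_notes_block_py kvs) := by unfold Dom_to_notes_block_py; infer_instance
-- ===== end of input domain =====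

-- B replaces A's two filtered scans by one bucket-distributing pass; equivalence is on the return value.

-- ===== PORT A =====
-- order = ['x', 'y', 'est', 'progress']
def pvOrderA : List String := ["x", "y", "est", "progress"]

-- literal port of A: first loop over `order` probing the dict, second loop over the dict
-- skipping the keys in `order` ('k in kvs' / 'kvs[k]' = first-match lookup on the assoc list).
def to_notes_block_py (kvs : List (String × Int)) : String :=
  let parts1 := pvOrderA.foldl (fun parts k =>
    match kvs.lookup k with
    | some v => parts ++ [k ++ "=" ++ PySem.Int.toStr v]
    | none => parts) []
  let parts := kvs.foldl (fun parts kv =>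
    if kv.1 ∈ pvOrderA then parts else parts ++ [kv.1 ++ "=" ++ PySem.Int.toStr kv.2]) parts1
  "[" ++ PySem.Str.join "," parts ++ "]"

-- ===== PORT B =====
-- rank = {'x': 0, 'y': 1, 'est': 2, 'progress': 3}
def pvRankB : PySem.Dict String Int :=
  PySem.Dict.ofList [("x", 0), ("y", 1), ("est", 2), ("progress", 3)]

-- buckets[rank.get(k, 4)].append(f"{k}={v}")
def pvBucketPut (b : List String × List String × List String × List String × List String)
    (r : Int) (s : String) :
    List String × List String × List String × List String × List String :=
  if r = 0 then (b.1 ++ [s], b.2.1, b.2.2.1, b.2.2.2.1, b.2.2.2.2)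
  else if r = 1 then (b.1, b.2.1 ++ [s], b.2.2.1, b.2.2.2.1, b.2.2.2.2)
  else if r = 2 then (b.1, b.2.1, b.2.2.1 ++ [s], b.2.2.2.1, b.2.2.2.2)
  else if r = 3 then (b.1, b.2.1, b.2.2.1, b.2.2.2.1 ++ [s], b.2.2.2.2)
  else (b.1, b.2.1, b.2.2.1, b.2.2.2.1, b.2.2.2.2 ++ [s])

-- literal port of B: one pass distributing entries into five rank buckets, then flatten.
def to_notes_block_py_alt (kvs : List (String × Int)) : String :=
  let b := kvs.foldl (fun b kv =>
      pvBucketPut b (pvRankB.getD kv.1 4) (kv.1 ++ "=" ++ PySem.Int.toStr kv.2))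
    ([], [], [], [], [])
  "[" ++ PySem.Str.join "," (b.1 ++ b.2.1 ++ b.2.2.1 ++ b.2.2.2.1 ++ b.2.2.2.2) ++ "]"

-- ===== PRECONDITION & SPEC =====
-- Pre_ requires pairwise-distinct keys: the Python argument is a dict, and an assoc list with
-- duplicate keys does not represent any Python dict input, so A never receives one.
def Pre_to_notes_block_py (kvs : List (String × Int)) : Prop := (kvs.map Prod.fst).Nodup
instance (kvs : List (String × Int)) : Decidable (Pre_to_notes_block_py kvs) := by
  unfold Pre_to_notes_block_py; infer_instance

def pvWitness_to_notes_block_py : (List (String × Int)) := [("y", 2), ("note", -1), ("x", 7)]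

def Spec_to_notes_block_py (kvs : List (String × Int)) (out : String) : Prop := out = to_notes_block_py_alt kvs
instance (kvs : List (String × Int)) (out : String) : Decidable (Spec_to_notes_block_py kvs out) := by unfold Spec_to_notes_block_py; infer_instance

-- ===== CLAIM (what is proved, stated in full; the proofs are below) =====
def Claim_equal_to_notes_block_py : Prop := ∀ (kvs : List (String × Int)), Dom_to_notes_block_py kvs → Pre_to_notes_block_py kvs → Spec_to_notes_block_py kvs (to_notes_block_py kvs)

-- ===== LEMMAS AND PROOFS =====

def pvFmt (kv : String × Int) : String := kv.1 ++ "=" ++ PySem.Int.toStr kv.2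

-- result of a single probe of A's first loop
def pvProbe (kvs : List (String × Int)) (k : String) : List String :=
  match kvs.lookup k with
  | some v => [k ++ "=" ++ PySem.Int.toStr v]
  | none => []

-- formatted entries whose key is s / whose key is none of the four priority keys
def pvSel (s : String) (kvs : List (String × Int)) : List String :=
  (kvs.filter (fun kv => kv.1 == s)).map pvFmt
def pvRest (kvs : List (String × Int)) : List String :=
  (kvs.filter (fun kv => !(kv.1 == "x" || kv.1 == "y" || kv.1 == "est" || kv.1 == "progress"))).map pvFmt

-- the loop bodies, named so the induction lemmas survive simp (defeq to the ports' lambdas)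
def pvStep2 (parts : List String) (kv : String × Int) : List String :=
  if kv.1 ∈ pvOrderA then parts else parts ++ [kv.1 ++ "=" ++ PySem.Int.toStr kv.2]
def pvStepB (b : List String × List String × List String × List String × List String)
    (kv : String × Int) : List String × List String × List String × List String × List String :=
  pvBucketPut b (pvRankB.getD kv.1 4) (kv.1 ++ "=" ++ PySem.Int.toStr kv.2)

lemma pvStepA (kvs : List (String × Int)) (k : String) (parts : List String) :
    (match kvs.lookup k with
     | some v => parts ++ [k ++ "=" ++ PySem.Int.toStr v]
     | none => parts) = parts ++ pvProbe kvs k := by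
  unfold pvProbe; cases kvs.lookup k <;> simp

lemma pvLoop2A (kvs : List (String × Int)) (acc : List String) :
    kvs.foldl pvStep2 acc = acc ++ pvRest kvs := by
  induction kvs generalizing acc with
  | nil => simp [pvRest]
  | cons kv t ih =>
    obtain ⟨k, v⟩ := kv
    rw [List.foldl_cons]
    by_cases hx : k = "x"
    · subst hx
      rw [show pvStep2 acc ("x", v) = acc from by simp [pvStep2, pvOrderA], ih]
      simp [pvRest]
    · by_cases hy : k = "y"
      · subst hy
        rw [show pvStep2 acc ("y", v) = acc from by simp [pvStep2, pvOrderA], ih]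
        simp [pvRest]
      · by_cases he : k = "est"
        · subst he
          rw [show pvStep2 acc ("est", v) = acc from by simp [pvStep2, pvOrderA], ih]
          simp [pvRest]
        · by_cases hp : k = "progress"
          · subst hp
            rw [show pvStep2 acc ("progress", v) = acc from by simp [pvStep2, pvOrderA], ih]
            simp [pvRest]
          · rw [show pvStep2 acc (k, v) = acc ++ [pvFmt (k, v)] from by
                  simp [pvStep2, pvOrderA, hx, hy, he, hp, pvFmt], ih]
            simp [pvRest, hx, hy, he, hp, pvFmt, List.append_assoc]

lemma pvRank_none (k : String) (hx : k ≠ "x") (hy : k ≠ "y") (he : k ≠ "est")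
    (hp : k ≠ "progress") : pvRankB.getD k 4 = 4 := by
  have hmk : pvRankB = PySem.Dict.mk [("x", 0), ("y", 1), ("est", 2), ("progress", 3)] := by rfl
  simp [hmk, PySem.Dict.getD, PySem.Dict.get?_mk_cons,
        show ("x" == k) = false by simp [(Ne.symm hx)],
        show ("y" == k) = false by simp [(Ne.symm hy)],
        show ("est" == k) = false by simp [(Ne.symm he)],
        show ("progress" == k) = false by simp [(Ne.symm hp)]]
  rfl

-- the bucket fold appends, to each bucket, the formatted entries whose rank selects it
lemma pvBucketFold (kvs : List (String × Int)) (a b c d e : List String) :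
    kvs.foldl pvStepB (a, b, c, d, e)
    = (a ++ pvSel "x" kvs, b ++ pvSel "y" kvs, c ++ pvSel "est" kvs,
       d ++ pvSel "progress" kvs, e ++ pvRest kvs) := by
  induction kvs generalizing a b c d e with
  | nil => simp [pvSel, pvRest]
  | cons kv t ih =>
    obtain ⟨k, v⟩ := kv
    rw [List.foldl_cons]
    by_cases hx : k = "x"
    · subst hx
      rw [show pvStepB (a, b, c, d, e) ("x", v) = (a ++ [pvFmt ("x", v)], b, c, d, e) from by
            simp [pvStepB, pvBucketPut, show pvRankB.getD "x" 4 = 0 from rfl, pvFmt], ih]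
      simp [pvSel, pvRest, List.append_assoc]
    · by_cases hy : k = "y"
      · subst hy
        rw [show pvStepB (a, b, c, d, e) ("y", v) = (a, b ++ [pvFmt ("y", v)], c, d, e) from by
              simp [pvStepB, pvBucketPut, show pvRankB.getD "y" 4 = 1 from rfl, pvFmt], ih]
        simp [pvSel, pvRest, List.append_assoc]
      · by_cases he' : k = "est"
        · subst he'
          rw [show pvStepB (a, b, c, d, e) ("est", v) = (a, b, c ++ [pvFmt ("est", v)], d, e) from by
                simp [pvStepB, pvBucketPut, show pvRankB.getD "est" 4 = 2 from rfl, pvFmt], ih]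
          simp [pvSel, pvRest, List.append_assoc]
        · by_cases hp : k = "progress"
          · subst hp
            rw [show pvStepB (a, b, c, d, e) ("progress", v)
                    = (a, b, c, d ++ [pvFmt ("progress", v)], e) from by
                  simp [pvStepB, pvBucketPut, show pvRankB.getD "progress" 4 = 3 from rfl, pvFmt], ih]
            simp [pvSel, pvRest, List.append_assoc]
          · rw [show pvStepB (a, b, c, d, e) (k, v) = (a, b, c, d, e ++ [pvFmt (k, v)]) from by
                  simp [pvStepB, pvBucketPut, pvRank_none k hx hy he' hp, pvFmt], ih]
            simp [pvSel, pvRest, hx, hy, he', hp, List.append_assoc]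

-- with distinct keys, the entries whose key equals s are exactly what lookup finds
lemma pvFilterEqLookup (kvs : List (String × Int)) (h : (kvs.map Prod.fst).Nodup) (s : String) :
    pvSel s kvs = pvProbe kvs s := by
  induction kvs with
  | nil => simp [pvSel, pvProbe]
  | cons kv t ih =>
    obtain ⟨k, v⟩ := kv
    simp only [List.map_cons, List.nodup_cons] at h
    by_cases hk : k = s
    · subst hk
      have hnil : t.filter (fun kv => kv.1 == k) = [] := by
        rw [List.filter_eq_nil_iff]
        intro p hp hps
        exact h.1 ((eq_of_beq hps) ▸ List.mem_map_of_mem hp)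
      simp [pvSel, pvProbe, List.lookup, List.filter_cons, hnil, pvFmt]
    · have h1 : (s == k) = false := by simp [Ne.symm hk]
      have h2 : (k == s) = false := by simp [hk]
      have ht := ih h.2
      simp only [pvSel, pvProbe, List.lookup, List.filter_cons, h1, h2] at *
      simpa using ht

-- ===== VERDICT (by name: the statement is the Claim_ definition above) =====
theorem to_notes_block_py_spec : Claim_equal_to_notes_block_py := by
  intro kvs _ hpre
  unfold Spec_to_notes_block_py to_notes_block_py to_notes_block_py_alt
  show "[" ++ PySem.Str.join ","
      (kvs.foldl pvStep2 (pvOrderA.foldl (fun parts k =>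
        match kvs.lookup k with
        | some v => parts ++ [k ++ "=" ++ PySem.Int.toStr v]
        | none => parts) [])) ++ "]"
    = "[" ++ PySem.Str.join ","
      ((kvs.foldl pvStepB ([], [], [], [], [])).1 ++
       (kvs.foldl pvStepB ([], [], [], [], [])).2.1 ++
       (kvs.foldl pvStepB ([], [], [], [], [])).2.2.1 ++
       (kvs.foldl pvStepB ([], [], [], [], [])).2.2.2.1 ++
       (kvs.foldl pvStepB ([], [], [], [], [])).2.2.2.2) ++ "]"
  simp only [pvOrderA, List.foldl_cons, List.foldl_nil]
  rw [pvStepA, pvStepA, pvStepA, pvStepA, pvLoop2A, pvBucketFold]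
  rw [pvFilterEqLookup kvs hpre "x", pvFilterEqLookup kvs hpre "y",
      pvFilterEqLookup kvs hpre "est", pvFilterEqLookup kvs hpre "progress"]
  simp [List.append_assoc]
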